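-- pv_equiv track=rewrite | github.com/hmghaly/word_align | align_utils.py | get_phrase_locs
-- ===== SOURCE A (Python) =====
-- def get_phrase_locs(tokens0,max_phrase_len=8): #identify locations of phrases of content words - excluding empty string/filtered tokens
--   content_words_locs=[w_i for w_i,wd0 in enumerate(tokens0) if wd0!=""]
--   all_phrases0=[]
--   for ii0,cur_loc0 in enumerate(content_words_locs):
--     cur_phrase=[cur_loc0]
--     all_phrases0.append(list(cur_phrase))
--     next_locs=content_words_locs[ii0+1:]
--     for nl in next_locs:
--       cur_phrase+=[nl]
--       all_phrases0.append(list(cur_phrase))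
--   all_phrase_locs_str=[]
--   for ap0 in all_phrases0:
--     phrase_tokens=tokens0[ap0[0]:ap0[-1]+1]
--     if len(phrase_tokens)>max_phrase_len: continue
--     all_phrase_locs_str.append((tuple(phrase_tokens),ap0))
--   return all_phrase_locs_str
-- ===== SOURCE B (Python) =====
-- def get_phrase_locs(tokens0, max_phrase_len=8):
--     # Two-pointer sliding window over the (increasing) content-word index list:
--     # for each start i the window end hi is advanced monotonically, so no
--     # per-pair length test and nothing generated for over-long spans; the
--     # token span and the location list are grown incrementally instead of
--     # being re-sliced for every pair.
--     locs = [i for i, w in enumerate(tokens0) if w != ""]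
--     n = len(locs)
--     out = []
--     hi = 0
--     for i in range(n):
--         if hi < i:
--             hi = i
--         while hi < n and locs[hi] - locs[i] + 1 <= max_phrase_len:
--             hi += 1
--         span = []
--         loc_list = []
--         prev = locs[i]
--         for j in range(i, hi):
--             span.extend(tokens0[prev:locs[j] + 1])
--             prev = locs[j] + 1
--             loc_list.append(locs[j])
--             out.append((tuple(span), list(loc_list)))
--     return out
-- ===== Notes on version B (the rewrite author's own statement) =====
-- stated objective: alternative
-- what changed: A generates every contiguous phrase-location run with an incremental accumulator and then filters over-long ones in a separate second pass; B uses a two-pointer sliding window over the increasing content-word index list (the window end advances monotonically, so no per-pair length test) and grows each token span and location list incrementally instead of re-slicing per pair.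
import Mathlib
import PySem

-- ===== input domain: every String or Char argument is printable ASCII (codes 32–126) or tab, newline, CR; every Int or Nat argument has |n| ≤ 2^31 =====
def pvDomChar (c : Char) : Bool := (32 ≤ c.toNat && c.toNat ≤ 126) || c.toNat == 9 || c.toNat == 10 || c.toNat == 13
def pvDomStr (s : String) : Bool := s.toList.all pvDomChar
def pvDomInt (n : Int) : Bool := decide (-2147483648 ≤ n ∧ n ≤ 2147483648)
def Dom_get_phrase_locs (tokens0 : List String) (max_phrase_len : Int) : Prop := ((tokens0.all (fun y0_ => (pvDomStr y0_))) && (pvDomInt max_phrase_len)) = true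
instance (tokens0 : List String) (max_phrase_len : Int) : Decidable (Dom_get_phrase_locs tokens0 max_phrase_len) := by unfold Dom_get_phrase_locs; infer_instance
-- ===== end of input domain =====

-- B replaces A's generate-all-pairs-then-filter with a two-pointer sliding window over the
-- increasing content-word index list, growing each span incrementally (objective: alternative).

-- ===== PORT A =====
-- [w_i for w_i,wd0 in enumerate(tokens0) if wd0!=""]  (identical first line of A and B)
def pvContentLocs (tokens0 : List String) : List Int :=
  ((PySem.List.enumerate tokens0).filter (fun p => p.2 != "")).map (fun p => p.1)

-- body of A's outer phrase-building loop (one step per (ii0, cur_loc0) of enumerate)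
def pvAPhrasesStep (cwl : List Int) (acc : List (List Int)) (p : Int × Int) : List (List Int) :=
  let next_locs := PySem.List.slice cwl (some (p.1 + 1)) none  -- content_words_locs[ii0+1:]
  (next_locs.foldl (fun (st : List Int × List (List Int)) nl =>
      (st.1 ++ [nl], st.2 ++ [st.1 ++ [nl]])) ([p.2], acc ++ [[p.2]])).2

-- body of A's second (filtering) loop; ap0 is always nonempty here, so the
-- defaults for ap0[0] / ap0[-1] are never used
def pvAFilterStep (tokens0 : List String) (max_phrase_len : Int)
    (acc : List (List String × List Int)) (ap0 : List Int) : List (List String × List Int) :=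
  let a := PySem.List.pyGetD ap0 0 0
  let b := PySem.List.pyGetD ap0 (-1) 0
  let phrase_tokens := PySem.List.slice tokens0 (some a) (some (b + 1))
  if (phrase_tokens.length : Int) > max_phrase_len then acc
  else acc ++ [(phrase_tokens, ap0)]

def get_phrase_locs (tokens0 : List String) (max_phrase_len : Int) :
    List (List String × List Int) :=
  let content_words_locs := pvContentLocs tokens0
  let all_phrases0 :=
    (PySem.List.enumerate content_words_locs).foldl (pvAPhrasesStep content_words_locs) []
  all_phrases0.foldl (pvAFilterStep tokens0 max_phrase_len) []

-- ===== PORT B =====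
-- the 'while hi < n and locs[hi] - locs[i] + 1 <= max_phrase_len: hi += 1' loop;
-- fuel locs.length bounds the number of iterations, which the loop guard caps at n - hi
def pvBAdvance (locs : List Int) (li mpl : Int) : Nat → Int → Int
  | 0, hi => hi
  | f + 1, hi =>
    if hi < (locs.length : Int) ∧ PySem.List.pyGetD locs hi 0 - li + 1 ≤ mpl
    then pvBAdvance locs li mpl f (hi + 1) else hi

-- inner 'for j in range(i, hi)' loop: state (span, prev, loc_list, out)
def pvBInner (tokens0 : List String) (locs : List Int) (i hi : Int)
    (out : List (List String × List Int)) : List (List String × List Int) :=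
  ((PySem.List.pyRange i hi 1).foldl
    (fun (st : List String × Int × List Int × List (List String × List Int)) j =>
      let lj := PySem.List.pyGetD locs j 0
      let span := st.1 ++ PySem.List.slice tokens0 (some st.2.1) (some (lj + 1))
      let ll := st.2.2.1 ++ [lj]
      (span, lj + 1, ll, st.2.2.2 ++ [(span, ll)]))
    ([], PySem.List.pyGetD locs i 0, [], out)).2.2.2

-- one iteration of the outer 'for i in range(n)' loop: state (hi, out)
def pvBStep (tokens0 : List String) (locs : List Int) (mpl : Int)
    (st : Int × List (List String × List Int)) (i : Int) :
    Int × List (List String × List Int) :=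
  let hi0 := if st.1 < i then i else st.1
  let hi := pvBAdvance locs (PySem.List.pyGetD locs i 0) mpl locs.length hi0
  (hi, pvBInner tokens0 locs i hi st.2)

def get_phrase_locs_alt (tokens0 : List String) (max_phrase_len : Int) :
    List (List String × List Int) :=
  let locs := pvContentLocs tokens0
  ((PySem.List.pyRange 0 (locs.length : Int) 1).foldl
     (pvBStep tokens0 locs max_phrase_len) (0, [])).2

-- ===== PRECONDITION & SPEC =====
def Spec_get_phrase_locs (tokens0 : List String) (max_phrase_len : Int) (out : List (List String × List Int)) : Prop := out = get_phrase_locs_alt tokens0 max_phrase_len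
instance (tokens0 : List String) (max_phrase_len : Int) (out : List (List String × List Int)) : Decidable (Spec_get_phrase_locs tokens0 max_phrase_len out) := by unfold Spec_get_phrase_locs; infer_instance

-- ===== CLAIM (what is proved, stated in full; the proofs are below) =====
def Claim_equal_get_phrase_locs : Prop := ∀ (tokens0 : List String) (max_phrase_len : Int), Dom_get_phrase_locs tokens0 max_phrase_len → Spec_get_phrase_locs tokens0 max_phrase_len (get_phrase_locs tokens0 max_phrase_len)

-- ===== LEMMAS AND PROOFS =====

-- what A's filter emits for one phrase-location list
def pvEmitA (tok : List String) (mpl : Int) (ap0 : List Int) : List (List String × List Int) :=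
  let a := PySem.List.pyGetD ap0 0 0
  let b := PySem.List.pyGetD ap0 (-1) 0
  let phrase := PySem.List.slice tok (some a) (some (b + 1))
  if (phrase.length : Int) > mpl then [] else [(phrase, ap0)]

-- the nonempty prefixes of t, shortest first
def pvPref (t : List Int) : List (List Int) :=
  (List.range t.length).map (fun k => t.take (k + 1))

-- all contiguous nonempty segments of t, in A's order
def pvSegs : List Int → List (List Int)
  | [] => []
  | a :: rest => pvPref (a :: rest) ++ pvSegs rest

-- the pair both programs emit for start index i and offset k into the content-loc list
def pvPair (tok : List String) (locs : List Int) (i k : Nat) : List String × List Int :=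
  (PySem.List.slice tok (some (locs.getD i 0)) (some (locs.getD (i + k) 0 + 1)),
   (locs.drop i).take (k + 1))

theorem pv_foldl_emit {α β : Type} (body : List β → α → List β) (g : α → List β)
    (h : ∀ acc x, body acc x = acc ++ g x) :
    ∀ (l : List α) (acc : List β), l.foldl body acc = acc ++ l.flatMap g := by
  intro l
  induction l with
  | nil => intro acc; simp
  | cons x xs ih => intro acc; simp [List.foldl_cons, h, ih]

theorem pvPref_cons (a : Int) (rest : List Int) :
    pvPref (a :: rest) = [a] :: (List.range rest.length).map (fun k => a :: rest.take (k + 1)) := by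
  simp [pvPref, List.range_succ_eq_map, List.map_map, Function.comp]

theorem pv_inner_A (nexts : List Int) :
    ∀ (cur : List Int) (acc : List (List Int)),
      (nexts.foldl (fun (st : List Int × List (List Int)) nl =>
          (st.1 ++ [nl], st.2 ++ [st.1 ++ [nl]])) (cur, acc)).2
        = acc ++ (List.range nexts.length).map (fun k => cur ++ nexts.take (k + 1)) := by
  induction nexts with
  | nil => intro cur acc; simp
  | cons n rest ih =>
    intro cur acc
    simp only [List.foldl_cons]
    rw [ih]
    simp [List.range_succ_eq_map, List.map_map, Function.comp]

theorem pv_outer_A (cwl : List Int) :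
    ∀ (t : List Int) (s : Int) (acc : List (List Int)), 0 ≤ s → cwl.drop s.toNat = t →
      (PySem.List.enumerate t s).foldl (pvAPhrasesStep cwl) acc = acc ++ pvSegs t := by
  intro t
  induction t with
  | nil => intro s acc _ _; simp [PySem.List.enumerate, pvSegs]
  | cons a rest ih =>
    intro s acc hs hdrop
    rw [PySem.List.enumerate_cons, List.foldl_cons]
    have hnext : PySem.List.slice cwl (some (s + 1)) none = rest := by
      rw [PySem.List.slice_from cwl (by omega : (0:Int) ≤ s + 1)]
      have h1 : (s + 1).toNat = s.toNat + 1 := by omega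
      rw [h1, ← List.drop_drop, hdrop]
      simp
    have hstep : pvAPhrasesStep cwl acc (s, a)
        = acc ++ pvPref (a :: rest) := by
      show (PySem.List.slice cwl (some (s + 1)) none |>.foldl _ ([a], acc ++ [[a]])).2 = _
      rw [hnext, pv_inner_A]
      rw [pvPref_cons]
      simp
    rw [hstep, ih (s + 1) _ (by omega) (by
      rw [show (s + 1).toNat = s.toNat + 1 by omega, ← List.drop_drop, hdrop]; simp)]
    simp [pvSegs]

theorem pv_filter_eq (tok : List String) (mpl : Int) (segs : List (List Int))
    (acc : List (List String × List Int)) :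
    segs.foldl (pvAFilterStep tok mpl) acc = acc ++ segs.flatMap (pvEmitA tok mpl) := by
  refine pv_foldl_emit _ (pvEmitA tok mpl) ?_ segs acc
  intro acc x
  simp only [pvAFilterStep, pvEmitA]
  split <;> simp

-- ---- facts about the content-word index list ----

theorem pvContentLocs_mem (tok : List String) (x : Int) (hx : x ∈ pvContentLocs tok) :
    0 ≤ x ∧ x < (tok.length : Int) := by
  unfold pvContentLocs at hx
  obtain ⟨p, hp, rfl⟩ := List.mem_map.1 hx
  have hp' := List.mem_filter.1 hp
  obtain ⟨k, hk, rfl⟩ := (PySem.List.mem_enumerate_iff _ _ _).1 hp'.1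
  constructor <;> simp <;> omega

theorem pvContentLocs_pairwise (tok : List String) :
    (pvContentLocs tok).Pairwise (· < ·) := by
  unfold pvContentLocs
  exact ((PySem.List.pairwise_lt_enumerate tok 0).filter _).map _ (fun a b h => h)

theorem pvL_mono (tok : List String) (p q : Nat) (hpq : p ≤ q)
    (hq : q < (pvContentLocs tok).length) :
    (pvContentLocs tok).getD p 0 ≤ (pvContentLocs tok).getD q 0 := by
  have hp : p < (pvContentLocs tok).length := lt_of_le_of_lt hpq hq
  rw [List.getD_eq_getElem _ _ hp, List.getD_eq_getElem _ _ hq]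
  rcases Nat.lt_or_ge p q with h | h
  · exact le_of_lt ((List.pairwise_iff_getElem.1 (pvContentLocs_pairwise tok)) p q hp hq h)
  · have : p = q := le_antisymm hpq h
    subst this; rfl

theorem pvL_range (tok : List String) (k : Nat) (hk : k < (pvContentLocs tok).length) :
    0 ≤ (pvContentLocs tok).getD k 0 ∧ (pvContentLocs tok).getD k 0 < (tok.length : Int) := by
  rw [List.getD_eq_getElem _ _ hk]
  exact pvContentLocs_mem tok _ (List.getElem_mem hk)

-- ---- the while loop (pvBAdvance) ----

theorem pvBAdvance_spec (locs : List Int) (li mpl : Int) :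
    ∀ (f : Nat) (hi : Int), 0 ≤ hi → hi.toNat ≤ locs.length →
      locs.length - hi.toNat ≤ f →
      hi ≤ pvBAdvance locs li mpl f hi ∧ 0 ≤ pvBAdvance locs li mpl f hi ∧
      (pvBAdvance locs li mpl f hi).toNat ≤ locs.length ∧
      (∀ j : Nat, hi.toNat ≤ j → j < (pvBAdvance locs li mpl f hi).toNat →
        locs.getD j 0 - li + 1 ≤ mpl) ∧
      ((pvBAdvance locs li mpl f hi).toNat < locs.length →
        ¬ (locs.getD (pvBAdvance locs li mpl f hi).toNat 0 - li + 1 ≤ mpl)) := by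
  intro f
  induction f with
  | zero =>
    intro hi h0 hle hf
    simp only [pvBAdvance]
    refine ⟨le_rfl, h0, hle, fun j hj1 hj2 => absurd hj2 (by omega), fun h => absurd h (by omega)⟩
  | succ f ih =>
    intro hi h0 hle hf
    simp only [pvBAdvance]
    split
    · rename_i hcond
      rw [PySem.List.pyGetD_of_nonneg locs 0 h0] at hcond
      have hlt : hi.toNat < locs.length := by omega
      obtain ⟨ha, hb, hc, hd, he⟩ := ih (hi + 1) (by omega) (by omega) (by omega)
      refine ⟨by omega, hb, hc, ?_, he⟩
      intro j hj1 hj2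
      rcases Nat.eq_or_lt_of_le hj1 with h | h
      · subst h
        exact hcond.2
      · exact hd j (by omega) hj2
    · rename_i hcond
      push_neg at hcond
      refine ⟨le_rfl, h0, hle, fun j hj1 hj2 => absurd hj2 (by omega), ?_⟩
      intro hlt
      by_cases h : hi < (locs.length : Int)
      · have := hcond h
        rw [PySem.List.pyGetD_of_nonneg locs 0 h0] at this
        intro hc; exact absurd hc (by omega)
      · omega

-- any two stopping points with the all-true / first-false property coincide
theorem pvStop_unique (n : Nat) (P : Nat → Prop) (a r1 r2 : Nat)
    (ha1 : a ≤ r1) (hb1 : r1 ≤ n) (hc1 : ∀ j, a ≤ j → j < r1 → P j) (hd1 : r1 < n → ¬ P r1)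
    (ha2 : a ≤ r2) (hb2 : r2 ≤ n) (hc2 : ∀ j, a ≤ j → j < r2 → P j) (hd2 : r2 < n → ¬ P r2) :
    r1 = r2 := by
  rcases Nat.lt_trichotomy r1 r2 with h | h | h
  · exact absurd (hc2 r1 ha1 h) (hd1 (by omega))
  · exact h
  · exact absurd (hc1 r2 ha2 h) (hd2 (by omega))

-- the canonical window end for start index i
def pvHi (locs : List Int) (mpl : Int) (i : Nat) : Nat :=
  (pvBAdvance locs (locs.getD i 0) mpl locs.length (i : Int)).toNat

theorem pvHi_spec (locs : List Int) (mpl : Int) (i : Nat) (hin : i ≤ locs.length) :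
    i ≤ pvHi locs mpl i ∧ pvHi locs mpl i ≤ locs.length ∧
    (∀ j : Nat, i ≤ j → j < pvHi locs mpl i → locs.getD j 0 - locs.getD i 0 + 1 ≤ mpl) ∧
    (pvHi locs mpl i < locs.length → ¬ (locs.getD (pvHi locs mpl i) 0 - locs.getD i 0 + 1 ≤ mpl)) := by
  unfold pvHi
  obtain ⟨ha, hb, hc, hd, he⟩ := pvBAdvance_spec locs (locs.getD i 0) mpl locs.length (i : Int)
    (by omega) (by omega) (by omega)
  exact ⟨by omega, hc, fun j hj1 hj2 => hd j (by omega) hj2, he⟩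

-- ---- the inner loop (pvBInner) ----

theorem pv_slice_glue (tok : List String) (a b c : Int) (h0 : 0 ≤ a) (hab : a ≤ b) (hbc : b ≤ c) :
    PySem.List.slice tok (some a) (some b) ++ PySem.List.slice tok (some b) (some c)
      = PySem.List.slice tok (some a) (some c) := by
  rw [PySem.List.slice_toNat tok h0 (by omega : (0:Int) ≤ b),
      PySem.List.slice_toNat tok (by omega : (0:Int) ≤ b) (by omega : (0:Int) ≤ c),
      PySem.List.slice_toNat tok h0 (by omega : (0:Int) ≤ c)]
  have h1 : c.toNat - a.toNat = (b.toNat - a.toNat) + (c.toNat - b.toNat) := by omega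
  rw [h1, List.take_add]
  congr 1
  rw [List.drop_drop]
  have h2 : a.toNat + (b.toNat - a.toNat) = b.toNat := by omega
  rw [h2]

-- invariant of the incremental span construction: after c steps the state is
-- (tok[L i : P c], P c, locs[i : i+c], out ++ first c pairs)
theorem pvBInner_inv (tok : List String) (locs : List Int) (mpl : Int) (i : Nat)
    (hmono : ∀ p q : Nat, p ≤ q → q < locs.length → locs.getD p 0 ≤ locs.getD q 0)
    (hrange : ∀ k : Nat, k < locs.length → 0 ≤ locs.getD k 0 ∧ locs.getD k 0 < (tok.length : Int)) :
    ∀ (c : Nat) (out : List (List String × List Int)), i + c ≤ locs.length →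
      (List.range c).foldl
        (fun (st : List String × Int × List Int × List (List String × List Int)) (k : Nat) =>
          let lj := locs.getD (i + k) 0
          let span := st.1 ++ PySem.List.slice tok (some st.2.1) (some (lj + 1))
          let ll := st.2.2.1 ++ [lj]
          (span, lj + 1, ll, st.2.2.2 ++ [(span, ll)]))
        ([], locs.getD i 0, [], out)
      = (PySem.List.slice tok (some (locs.getD i 0))
            (some (if c = 0 then locs.getD i 0 else locs.getD (i + (c - 1)) 0 + 1)),
         (if c = 0 then locs.getD i 0 else locs.getD (i + (c - 1)) 0 + 1),
         (locs.drop i).take c,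
         out ++ (List.range c).map (pvPair tok locs i)) := by
  intro c
  induction c with
  | zero =>
    intro out _
    have h0 : (0:Int) ≤ locs.getD i 0 := by
      rcases Nat.lt_or_ge i locs.length with h | h
      · exact (hrange i h).1
      · rw [List.getD_eq_default _ _ h]
    have hsl : PySem.List.slice tok (some (locs.getD i 0)) (some (locs.getD i 0)) = [] := by
      rw [PySem.List.slice_toNat tok h0 h0]
      simp
    simp only [List.range_zero, List.foldl_nil, List.map_nil, List.append_nil,
      List.take_zero, reduceIte]
    rw [hsl]
  | succ c ih =>
    intro out hc
    rw [List.range_succ, List.foldl_append, ih out (by omega)]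
    simp only [List.foldl_cons, List.foldl_nil]
    have hic : i + c < locs.length := by omega
    have hi0 : 0 ≤ locs.getD i 0 := (hrange i (by omega)).1
    have hglue : PySem.List.slice tok (some (locs.getD i 0))
          (some (if c = 0 then locs.getD i 0 else locs.getD (i + (c - 1)) 0 + 1))
        ++ PySem.List.slice tok
            (some (if c = 0 then locs.getD i 0 else locs.getD (i + (c - 1)) 0 + 1))
            (some (locs.getD (i + c) 0 + 1))
        = PySem.List.slice tok (some (locs.getD i 0)) (some (locs.getD (i + c) 0 + 1)) := by
      apply pv_slice_glue tok _ _ _ hi0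
      · rcases Nat.eq_zero_or_pos c with h | h
        · subst h; exact le_rfl
        · have := hmono i (i + (c - 1)) (by omega) (by omega)
          simp only [if_neg (by omega : ¬ c = 0)]
          omega
      · rcases Nat.eq_zero_or_pos c with h | h
        · subst h
          show locs.getD i 0 ≤ locs.getD (i + 0) 0 + 1
          have h5 := hmono i (i + 0) (by omega) (by omega)
          omega
        · have := hmono (i + (c - 1)) (i + c) (by omega) hic
          simp only [if_neg (by omega : ¬ c = 0)]
          omega
    have htake : (locs.drop i).take c ++ [locs.getD (i + c) 0] = (locs.drop i).take (c + 1) := by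
      rw [List.take_succ]
      congr 1
      rw [List.getElem?_drop, List.getD_eq_getElem?_getD, List.getElem?_eq_getElem hic]
      rfl
    have hpair : pvPair tok locs i c
        = (PySem.List.slice tok (some (locs.getD i 0)) (some (locs.getD (i + c) 0 + 1)),
           (locs.drop i).take (c + 1)) := rfl
    rw [hglue, htake]
    refine Prod.ext rfl (Prod.ext rfl (Prod.ext rfl ?_))
    simp only [List.range_succ, List.map_append, List.map_cons, List.map_nil, hpair]
    simp

theorem pvBInner_eq (tok : List String) (locs : List Int) (mpl : Int) (i hi : Nat)
    (hmono : ∀ p q : Nat, p ≤ q → q < locs.length → locs.getD p 0 ≤ locs.getD q 0)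
    (hrange : ∀ k : Nat, k < locs.length → 0 ≤ locs.getD k 0 ∧ locs.getD k 0 < (tok.length : Int))
    (hih : i ≤ hi) (hn : hi ≤ locs.length) (out : List (List String × List Int)) :
    pvBInner tok locs (i : Int) (hi : Int) out
      = out ++ (List.range (hi - i)).map (pvPair tok locs i) := by
  unfold pvBInner
  rw [PySem.List.pyRange_one]
  have h1 : ((hi : Int) - (i : Int)).toNat = hi - i := by omega
  rw [h1, List.foldl_map, PySem.List.pyGetD_natCast]
  have heq : (List.range (hi - i)).foldl
      (fun (st : List String × Int × List Int × List (List String × List Int)) (k : Nat) =>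
        (fun st (j : Int) =>
          let lj := PySem.List.pyGetD locs j 0
          let span := st.1 ++ PySem.List.slice tok (some st.2.1) (some (lj + 1))
          let ll := st.2.2.1 ++ [lj]
          (span, lj + 1, ll, st.2.2.2 ++ [(span, ll)])) st ((i : Int) + (k : Nat)))
      ([], locs.getD i 0, [], out)
    = (List.range (hi - i)).foldl
        (fun (st : List String × Int × List Int × List (List String × List Int)) (k : Nat) =>
          let lj := locs.getD (i + k) 0
          let span := st.1 ++ PySem.List.slice tok (some st.2.1) (some (lj + 1))
          let ll := st.2.2.1 ++ [lj]
          (span, lj + 1, ll, st.2.2.2 ++ [(span, ll)]))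
        ([], locs.getD i 0, [], out) := by
    apply List.foldl_ext
    intro st k _
    have hcast : PySem.List.pyGetD locs ((i : Int) + (k : Nat)) 0 = locs.getD (i + k) 0 := by
      rw [show ((i : Int) + (k : Nat)) = ((i + k : Nat) : Int) by push_cast; ring,
          PySem.List.pyGetD_natCast]
    simp only [hcast]
  rw [heq, pvBInner_inv tok locs mpl i hmono hrange (hi - i) out (by omega)]

-- ---- per-start equality of the emitted pairs ----

theorem pvEmitA_take (tok : List String) (locs : List Int) (mpl : Int) (i k : Nat)
    (hrange : ∀ m : Nat, m < locs.length → 0 ≤ locs.getD m 0 ∧ locs.getD m 0 < (tok.length : Int))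
    (hmono : ∀ p q : Nat, p ≤ q → q < locs.length → locs.getD p 0 ≤ locs.getD q 0)
    (hk : i + k < locs.length) :
    pvEmitA tok mpl ((locs.drop i).take (k + 1))
      = if locs.getD (i + k) 0 - locs.getD i 0 + 1 ≤ mpl then [pvPair tok locs i k] else [] := by
  have hkt : k < (locs.drop i).length := by
    rw [List.length_drop]; omega
  have hlen : ((locs.drop i).take (k + 1)).length = k + 1 := by
    rw [List.length_take, List.length_drop]; omega
  have hne : (locs.drop i).take (k + 1) ≠ [] := by
    intro h; rw [h] at hlen; simp at hlen
  have hfirst : PySem.List.pyGetD ((locs.drop i).take (k + 1)) 0 0 = locs.getD i 0 := by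
    rw [PySem.List.pyGetD_eq_getElem _ 0 le_rfl (by rw [hlen]; exact_mod_cast Nat.succ_pos k)]
    simp only [Int.toNat_zero, List.getElem_take, List.getElem_drop]
    rw [List.getD_eq_getElem locs 0 (by omega : i < locs.length)]
    congr 1
  have hsplit : (locs.drop i).take (k + 1) = (locs.drop i).take k ++ [(locs.drop i)[k]] := by
    rw [List.take_succ, List.getElem?_eq_getElem hkt]
    rfl
  have hlast : PySem.List.pyGetD ((locs.drop i).take (k + 1)) (-1) 0 = locs.getD (i + k) 0 := by
    rw [hsplit, PySem.List.pyGetD_neg_one_append_singleton, List.getElem_drop,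
        List.getD_eq_getElem locs 0 hk]
  have h0i : 0 ≤ locs.getD i 0 := (hrange i (by omega)).1
  have hik : locs.getD i 0 ≤ locs.getD (i + k) 0 := hmono i (i + k) (by omega) hk
  have hikb : locs.getD (i + k) 0 < (tok.length : Int) := (hrange (i + k) hk).2
  have hslen : ((PySem.List.slice tok (some (locs.getD i 0))
      (some (locs.getD (i + k) 0 + 1))).length : Int) = locs.getD (i + k) 0 + 1 - locs.getD i 0 := by
    rw [PySem.List.slice_toNat tok h0i (by omega : (0:Int) ≤ locs.getD (i + k) 0 + 1)]
    rw [List.length_take, List.length_drop]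
    omega
  simp only [pvEmitA, hfirst, hlast, hslen]
  by_cases h : locs.getD (i + k) 0 - locs.getD i 0 + 1 ≤ mpl
  · rw [if_neg (by omega), if_pos h]
    rfl
  · rw [if_pos (by omega), if_neg h]

-- flatMap of an if-singleton over a list where the condition always holds / never holds
theorem pv_flatMap_all {β : Type} (p : Nat → Prop) [DecidablePred p] (f : Nat → β) :
    ∀ (l : List Nat), (∀ x ∈ l, p x) →
      l.flatMap (fun k => if p k then [f k] else []) = l.map f := by
  intro l
  induction l with
  | nil => intro _; rfl
  | cons x xs ih =>
    intro h
    rw [List.flatMap_cons, List.map_cons, if_pos (h x List.mem_cons_self),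
        ih (fun y hy => h y (List.mem_cons_of_mem x hy))]
    rfl

theorem pv_flatMap_none {β : Type} (p : Nat → Prop) [DecidablePred p] (f : Nat → β) :
    ∀ (l : List Nat), (∀ x ∈ l, ¬ p x) →
      l.flatMap (fun k => if p k then [f k] else []) = [] := by
  intro l
  induction l with
  | nil => intro _; rfl
  | cons x xs ih =>
    intro h
    rw [List.flatMap_cons, if_neg (h x List.mem_cons_self),
        ih (fun y hy => h y (List.mem_cons_of_mem x hy))]
    rfl

-- flatMap over a range of an if-singleton, when the condition is a prefix property
theorem pv_flatMap_if_prefix {β : Type} (p : Nat → Prop) [DecidablePred p] (f : Nat → β)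
    (c m : Nat) (hcm : c ≤ m) (h1 : ∀ k, k < c → p k) (h2 : ∀ k, c ≤ k → k < m → ¬ p k) :
    (List.range m).flatMap (fun k => if p k then [f k] else []) = (List.range c).map f := by
  have hm : m = c + (m - c) := by omega
  have hsplit : List.range m = List.range c ++ List.range' c (m - c) := by
    calc List.range m = List.range' 0 (c + (m - c)) := by
          rw [List.range_eq_range', ← hm]
      _ = List.range' 0 c ++ List.range' (0 + 1 * c) (m - c) := (List.range'_append).symm
      _ = List.range c ++ List.range' c (m - c) := by
          rw [← List.range_eq_range', Nat.one_mul, Nat.zero_add]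
  rw [hsplit, List.flatMap_append,
      pv_flatMap_all p f (List.range c) (fun x hx => h1 x (List.mem_range.1 hx)),
      pv_flatMap_none p f (List.range' c (m - c))
        (fun x hx => h2 x (List.mem_range'_1.1 hx).1 (by
          have := (List.mem_range'_1.1 hx).2
          omega))]
  rw [List.append_nil]

theorem pv_per_start (tok : List String) (locs : List Int) (mpl : Int) (i : Nat)
    (hmono : ∀ p q : Nat, p ≤ q → q < locs.length → locs.getD p 0 ≤ locs.getD q 0)
    (hrange : ∀ k : Nat, k < locs.length → 0 ≤ locs.getD k 0 ∧ locs.getD k 0 < (tok.length : Int))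
    (hi : i < locs.length) :
    (pvPref (locs.drop i)).flatMap (pvEmitA tok mpl)
      = (List.range (pvHi locs mpl i - i)).map (pvPair tok locs i) := by
  obtain ⟨ha, hb, hc, hd⟩ := pvHi_spec locs mpl i (by omega)
  unfold pvPref
  rw [List.flatMap_map]
  have hlen : (locs.drop i).length = locs.length - i := by simp
  rw [hlen]
  have heq : ∀ k ∈ List.range (locs.length - i),
      pvEmitA tok mpl ((locs.drop i).take (k + 1))
        = if locs.getD (i + k) 0 - locs.getD i 0 + 1 ≤ mpl
          then [pvPair tok locs i k] else [] := by
    intro k hk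
    rw [List.mem_range] at hk
    exact pvEmitA_take tok locs mpl i k hrange hmono (by omega)
  rw [List.flatMap_congr heq]
  apply pv_flatMap_if_prefix (fun k => locs.getD (i + k) 0 - locs.getD i 0 + 1 ≤ mpl)
    (pvPair tok locs i) (pvHi locs mpl i - i) (locs.length - i) (by omega)
  · intro k hk
    exact hc (i + k) (by omega) (by omega)
  · intro k hk1 hk2
    intro hcond
    have hdn : pvHi locs mpl i < locs.length := by omega
    have := hmono (pvHi locs mpl i) (i + k) (by omega) (by omega)
    exact hd hdn (by omega)

-- ---- the outer loop ----

theorem pv_outer_B (tok : List String) (locs : List Int) (mpl : Int)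
    (hmono : ∀ p q : Nat, p ≤ q → q < locs.length → locs.getD p 0 ≤ locs.getD q 0)
    (hrange : ∀ k : Nat, k < locs.length → 0 ≤ locs.getD k 0 ∧ locs.getD k 0 < (tok.length : Int)) :
    ∀ (d i : Nat) (hi : Int) (out : List (List String × List Int)),
      i + d = locs.length → 0 ≤ hi → hi.toNat ≤ locs.length →
      (∀ j : Nat, i ≤ j → j < hi.toNat → locs.getD j 0 - locs.getD i 0 + 1 ≤ mpl) →
      (((List.range' i d).map (fun (k : Nat) => (k : Int))).foldl (pvBStep tok locs mpl) (hi, out)).2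
        = out ++ (pvSegs (locs.drop i)).flatMap (pvEmitA tok mpl) := by
  intro d
  induction d with
  | zero =>
    intro i hi out hid h0 hle hinv
    have : locs.drop i = [] := by apply List.drop_eq_nil_of_le; omega
    simp [this, pvSegs]
  | succ d ih =>
    intro i hi out hid h0 hle hinv
    have hiln : i < locs.length := by omega
    rw [List.range'_succ, List.map_cons, List.foldl_cons]
    -- the step at i
    have hstep : pvBStep tok locs mpl (hi, out) (i : Int)
        = ((pvHi locs mpl i : Int),
           out ++ (List.range (pvHi locs mpl i - i)).map (pvPair tok locs i)) := by
      show ((pvBAdvance locs (PySem.List.pyGetD locs (i : Int) 0) mpl locs.length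
              (if hi < (i : Int) then (i : Int) else hi)),
            pvBInner tok locs (i : Int)
              (pvBAdvance locs (PySem.List.pyGetD locs (i : Int) 0) mpl locs.length
                (if hi < (i : Int) then (i : Int) else hi)) out) = _
      have hli : PySem.List.pyGetD locs (i : Int) 0 = locs.getD i 0 :=
        PySem.List.pyGetD_natCast locs i 0
      rw [hli]
      have h00 : (0:Int) ≤ (if hi < (i : Int) then (i : Int) else hi) := by split <;> omega
      have h01 : i ≤ (if hi < (i : Int) then (i : Int) else hi).toNat := by split <;> omega
      have h02 : (if hi < (i : Int) then (i : Int) else hi).toNat ≤ locs.length := by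
        split <;> omega
      have h03 : ∀ j : Nat, i ≤ j → j < (if hi < (i : Int) then (i : Int) else hi).toNat →
          locs.getD j 0 - locs.getD i 0 + 1 ≤ mpl := by
        intro j hj1 hj2
        split at hj2
        · omega
        · exact hinv j hj1 hj2
      obtain ⟨sa, sb, sc, sd, se⟩ := pvBAdvance_spec locs (locs.getD i 0) mpl locs.length
        (if hi < (i : Int) then (i : Int) else hi) h00 h02 (by omega)
      obtain ⟨ta, tb, tc, td⟩ := pvHi_spec locs mpl i (by omega)
      have hrn : (pvBAdvance locs (locs.getD i 0) mpl locs.length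
          (if hi < (i : Int) then (i : Int) else hi)).toNat = pvHi locs mpl i := by
        apply pvStop_unique locs.length (fun j => locs.getD j 0 - locs.getD i 0 + 1 ≤ mpl) i
        · omega
        · exact sc
        · intro j hj1 hj2
          rcases Nat.lt_or_ge j (if hi < (i : Int) then (i : Int) else hi).toNat with h | h
          · exact h03 j hj1 h
          · exact sd j h hj2
        · exact se
        · exact ta
        · exact tb
        · exact tc
        · exact td
      have hrInt : pvBAdvance locs (locs.getD i 0) mpl locs.length
          (if hi < (i : Int) then (i : Int) else hi) = ((pvHi locs mpl i : Nat) : Int) := by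
        omega
      rw [hrInt]
      exact Prod.ext rfl (pvBInner_eq tok locs mpl i (pvHi locs mpl i) hmono hrange ta tb out)
    rw [hstep]
    -- establish invariant for i + 1
    have hinv' : ∀ j : Nat, i + 1 ≤ j → j < ((pvHi locs mpl i : Nat) : Int).toNat →
        locs.getD j 0 - locs.getD (i + 1) 0 + 1 ≤ mpl := by
      intro j hj1 hj2
      simp only [Int.toNat_natCast] at hj2
      obtain ⟨ta, tb, tc, td⟩ := pvHi_spec locs mpl i (by omega)
      have h1 := tc j (by omega) hj2
      have h2 : locs.getD i 0 ≤ locs.getD (i + 1) 0 := hmono i (i + 1) (by omega) (by omega)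
      omega
    have hrec := ih (i + 1) ((pvHi locs mpl i : Nat) : Int)
      (out ++ (List.range (pvHi locs mpl i - i)).map (pvPair tok locs i))
      (by omega) (by omega) (by
        simp only [Int.toNat_natCast]
        exact (pvHi_spec locs mpl i (by omega)).2.1) hinv'
    rw [hrec]
    -- regroup: Ei ++ rest = flatMap over pvSegs (drop i)
    have hdrop : locs.drop i = locs.getD i 0 :: locs.drop (i + 1) := by
      rw [List.getD_eq_getElem locs 0 hiln, ← List.getElem_cons_drop]
    have hsegs : pvSegs (locs.drop i)
        = pvPref (locs.drop i) ++ pvSegs (locs.drop (i + 1)) := by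
      rw [hdrop, pvSegs, ← hdrop]
    rw [hsegs, List.flatMap_append, List.append_assoc]
    congr 2
    exact (pv_per_start tok locs mpl i hmono hrange hiln).symm

-- ===== VERDICT (by name: the statement is the Claim_ definition above) =====
theorem get_phrase_locs_spec : Claim_equal_get_phrase_locs := by
  intro tokens0 mpl _
  show get_phrase_locs tokens0 mpl = get_phrase_locs_alt tokens0 mpl
  set locs := pvContentLocs tokens0 with hlocs
  have hmono := pvL_mono tokens0
  have hrange := pvL_range tokens0
  -- A's value
  rw [show get_phrase_locs tokens0 mpl
        = List.foldl (pvAFilterStep tokens0 mpl) []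
            (List.foldl (pvAPhrasesStep locs) []
              (PySem.List.enumerate locs)) from rfl,
      pv_outer_A locs locs 0 [] le_rfl (by simp),
      pv_filter_eq]
  -- B's value
  show _ = ((PySem.List.pyRange 0 (locs.length : Int) 1).foldl
     (pvBStep tokens0 locs mpl) (0, [])).2
  rw [PySem.List.pyRange_one]
  have h1 : ((locs.length : Int) - 0).toNat = locs.length := by omega
  rw [h1]
  have h2 : (List.range locs.length).map (fun (k : Nat) => (0 : Int) + (k : Nat))
      = (List.range' 0 locs.length).map (fun (k : Nat) => (k : Int)) := by
    rw [List.range_eq_range']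
    apply List.map_congr_left
    intro k _
    omega
  rw [h2, pv_outer_B tokens0 locs mpl (fun p q a b => hmono p q a b) (fun k h => hrange k h)
        locs.length 0 0 [] (by omega) le_rfl (by omega) (by intro j h1 h2; omega)]
  simp
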